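-- pv_equiv track=rewrite | github.com/csestelo/dojo | breakline/linebreak.py | linebreak3
-- ===== SOURCE A (Python) =====
-- def linebreak3(text, columns):
--     lines = []
--     # enquanto text nao eh vazio, i.e. text != ''
--     # lembre que coisas vazias em python sao consideradas falsas
--     while text:
--         last_space = None
--         # enumerate retorna tuplas (posicao, elemento)
--         for pos, letter in enumerate(text):
--             if letter == ' ':
--                 last_space = pos
--             # quando chegamos ao limite. note que no corpo desse if assumimos
--             # que ja vimos um espaco antes (o texto eh quebravel), entao a gente
--             # precisa garantir que o last_space nao eh None (vide o else do for)
--             if pos == columns and last_space is not None: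
--                 # fazemos as alteracoes baseadas no ultimo espaco
--                 update_idx = last_space
--                 break  # para o for no meio
--         # soh entra no else quando o for chega ao final, i.e. nao deu break,
--         # i.e. a ultima linha eh menor que o limite de colunas
--         else:
--             # o caso em que a palavra eh maior que o limite
--             if len(text) > columns:
--                 raise ValueError('Can\'t break word: "{}"'.format(text))
--             # fazemos as alteracoes baseadas na pos. o + 1 eh porque no slice o
--             # limite final nao eh icluso, entao tem que adicionar 1 para incluir
--             # a string at o final
--             update_idx = pos + 1
--         curr_line = text[:update_idx]
--         rest_of_text = text[update_idx + 1:]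
--         lines.append(curr_line)
--         text = rest_of_text
--     return '\n'.join(lines)
-- ===== SOURCE B (Python) =====
-- def linebreak3(text, columns):
--     # Tokenize once into words, then greedily pack words into lines.
--     def pack(words):
--         if words == ['']:  # remaining text is empty -> no more lines
--             return []
--         cur = words[0]
--         k = 1
--         while k < len(words) and len(cur) + 1 + len(words[k]) <= columns:
--             cur = cur + ' ' + words[k]
--             k += 1
--         if len(cur) > columns:
--             raise ValueError('Can\'t break word: "{}"'.format(cur))
--         if k == len(words):
--             return [cur]
--         return [cur] + pack(words[k:])
--     return '\n'.join(pack(text.split(' ')))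
-- ===== Notes on version B (the rewrite author's own statement) =====
-- stated objective: alternative
-- what changed: B tokenizes the text once with text.split(' ') and greedily packs whole words into lines by accumulated length, instead of A's character-by-character scan that tracks the last seen space and breaks at the column index.
import Mathlib
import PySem

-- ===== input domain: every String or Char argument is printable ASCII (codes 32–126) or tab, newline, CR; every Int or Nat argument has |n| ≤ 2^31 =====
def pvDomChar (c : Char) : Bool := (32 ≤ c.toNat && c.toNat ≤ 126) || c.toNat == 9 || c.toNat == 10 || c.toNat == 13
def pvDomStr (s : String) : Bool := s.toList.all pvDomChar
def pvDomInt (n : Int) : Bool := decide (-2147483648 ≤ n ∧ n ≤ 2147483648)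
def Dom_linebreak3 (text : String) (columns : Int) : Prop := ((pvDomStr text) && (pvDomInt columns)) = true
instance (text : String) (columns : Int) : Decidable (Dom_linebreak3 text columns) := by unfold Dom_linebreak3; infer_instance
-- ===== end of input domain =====

-- B tokenizes the text once with text.split(' ') and greedily packs whole words into
-- lines by accumulated length, instead of A's character scan that tracks the last
-- seen space and breaks at the column index (objective: alternative).

-- ===== PORT A =====
-- inner for-loop of A: scans enumerate positions, tracking last_space; returns
-- some update_idx when the `break` fires, none when the for runs out (Python's for-else)
def pvA_inner (columns : Int) : List Char → Nat → Option Nat → Option Nat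
  | [], _, _ => none
  | c :: rest, pos, ls0 =>
    let ls := if c = ' ' then some pos else ls0
    if (pos : Int) = columns ∧ ls ≠ none then ls
    else pvA_inner columns rest (pos + 1) ls

-- outer while-loop of A; `lines` is the accumulated list (of char lists).
-- text[:i] / text[i+1:] with the nonnegative in-range i these paths produce are
-- List.take i / List.drop (i+1) (exact there).
-- fuel only makes the recursion structural; one unit per emitted line, so
-- text.length + 1 units are never exhausted
def pvA_loop (columns : Int) : Nat → List Char → List (List Char) → List (List Char)
  | 0, _, lines => lines
  | _ + 1, [], lines => lines
  | d + 1, c :: cs, lines =>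
    match pvA_inner columns (c :: cs) 0 none with
    | some i => pvA_loop columns d ((c :: cs).drop (i + 1)) (lines ++ [(c :: cs).take i])
    | none =>
      -- for-else branch: pos holds its final value len-1
      let pos := (c :: cs).length - 1
      if ((c :: cs).length : Int) > columns then lines   -- raise ValueError (excluded by Pre_)
      else pvA_loop columns d ((c :: cs).drop ((pos + 1) + 1)) (lines ++ [(c :: cs).take (pos + 1)])

def linebreak3 (text : String) (columns : Int) : String :=
  PySem.Str.join "\n" ((pvA_loop columns (text.toList.length + 1) text.toList []).map String.ofList)

-- ===== PORT B =====
-- inner while-loop of B's pack: greedily extend cur with words[k] while it fits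
-- (fuel only makes the recursion structural; len(words) units are never exhausted)
def pvGreedy (c : Int) (words : List (List Char)) : Nat → List Char → Nat → List Char × Nat
  | 0, cur, k => (cur, k)
  | d + 1, cur, k =>
    if k < words.length ∧ ((cur.length : Int) + 1 + ((words.getD k []).length : Int) ≤ c) then
      pvGreedy c words d (cur ++ ' ' :: words.getD k []) (k + 1)
    else (cur, k)

-- Source B's recursive pack: one line per call (one fuel unit each; len(words) units
-- suffice since every call drops k ≥ 1 words).  pack is never called on [] in Source B
-- (split(' ') is never empty and k ≤ len(words)); that arm is a total-function stub.
def pvPack (c : Int) : Nat → List (List Char) → List (List Char)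
  | 0, _ => []
  | _ + 1, [] => []
  | d + 1, w :: ws =>
    if w :: ws = [[]] then []   -- words == ['']: remaining text empty, no more lines
    else
      let p := pvGreedy c (w :: ws) (w :: ws).length w 1
      if (p.1.length : Int) > c then []   -- raise ValueError (excluded by Pre_)
      else if p.2 = (w :: ws).length then [p.1]
      else p.1 :: pvPack c d ((w :: ws).drop p.2)

def linebreak3_alt (text : String) (columns : Int) : String :=
  PySem.Str.join "\n"
    (((pvPack columns (PySem.Chars.splitOn text.toList [' ']).length
        (PySem.Chars.splitOn text.toList [' '])).map String.ofList))

-- ===== PRECONDITION & SPEC =====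
-- Pre_ excludes exactly the inputs on which A raises ValueError (a space-free stretch
-- longer than `columns` — incl. any negative `columns` — with nonempty text); B raises
-- ValueError on exactly the same inputs.  A returns iff text is empty, or columns ≥ 0
-- and every window of columns+1 consecutive characters contains a space.
def Pre_linebreak3 (text : String) (columns : Int) : Prop :=
  text = "" ∨ (0 ≤ columns ∧ ∀ i < text.toList.length,
    i + columns.toNat < text.toList.length →
      ∃ j ≤ i + columns.toNat, i ≤ j ∧ text.toList[j]? = some ' ')
instance (text : String) (columns : Int) : Decidable (Pre_linebreak3 text columns) := by
  unfold Pre_linebreak3; infer_instance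
def pvWitness_linebreak3 : String × Int := ("a b", 2)

def Spec_linebreak3 (text : String) (columns : Int) (out : String) : Prop := out = linebreak3_alt text columns
instance (text : String) (columns : Int) (out : String) : Decidable (Spec_linebreak3 text columns out) := by unfold Spec_linebreak3; infer_instance

-- ===== CLAIM (what is proved, stated in full; the proofs are below) =====
def Claim_equal_linebreak3 : Prop := ∀ (text : String) (columns : Int), Dom_linebreak3 text columns → Pre_linebreak3 text columns → Spec_linebreak3 text columns (linebreak3 text columns)

-- ===== LEMMAS AND PROOFS =====

-- last index j with lo ≤ j ≤ hi and t[j] = ' ' (the spec of A's last_space at the break)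
def winLS (t : List Char) (lo : Nat) : Nat → Option Nat
  | 0 => if lo = 0 ∧ t[0]? = some ' ' then some 0 else none
  | hi + 1 => if hi + 1 < lo then none
    else if t[hi + 1]? = some ' ' then some (hi + 1) else winLS t lo hi

lemma winLS_none_of_lt (t : List Char) (lo hi : Nat) (h : hi < lo) : winLS t lo hi = none := by
  cases hi with
  | zero => simp only [winLS]; rw [if_neg (fun hcon => absurd hcon.1 (by omega))]
  | succ n => simp only [winLS]; rw [if_pos h]

lemma winLS_self (t : List Char) (pos : Nat) :
    winLS t pos pos = if t[pos]? = some ' ' then some pos else none := by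
  cases pos with
  | zero => by_cases hsp : t[0]? = some ' ' <;> simp [winLS, hsp]
  | succ n =>
    simp only [winLS]
    rw [if_neg (show ¬ (n + 1 < n + 1) by omega), winLS_none_of_lt t (n + 1) n (by omega)]

lemma winLS_some (t : List Char) (lo : Nat) : ∀ hi l, winLS t lo hi = some l →
    lo ≤ l ∧ l ≤ hi ∧ t[l]? = some ' ' := by
  intro hi
  induction hi with
  | zero =>
    intro l h
    simp only [winLS] at h
    by_cases h1 : lo = 0 ∧ t[0]? = some ' '
    · rw [if_pos h1] at h
      obtain rfl : (0 : Nat) = l := Option.some.inj h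
      exact ⟨by omega, by omega, h1.2⟩
    · rw [if_neg h1] at h
      exact absurd h (by simp)
  | succ n ih =>
    intro l h
    simp only [winLS] at h
    by_cases h1 : n + 1 < lo
    · rw [if_pos h1] at h
      exact absurd h (by simp)
    · rw [if_neg h1] at h
      by_cases h2 : t[n + 1]? = some ' '
      · rw [if_pos h2] at h
        obtain rfl : n + 1 = l := Option.some.inj h
        exact ⟨by omega, le_refl _, h2⟩
      · rw [if_neg h2] at h
        rcases ih l h with ⟨a, b, c⟩
        exact ⟨a, by omega, c⟩

lemma winLS_isSome (t : List Char) (lo : Nat) : ∀ hi, (∃ j, lo ≤ j ∧ j ≤ hi ∧ t[j]? = some ' ') →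
    winLS t lo hi ≠ none := by
  intro hi
  induction hi with
  | zero =>
    rintro ⟨j, h1, h2, h3⟩
    have hj : j = 0 := by omega
    subst hj
    have hlo : lo = 0 := by omega
    simp only [winLS]
    rw [if_pos ⟨hlo, h3⟩]
    simp
  | succ n ih =>
    rintro ⟨j, h1, h2, h3⟩
    simp only [winLS]
    by_cases h4 : n + 1 < lo
    · exact absurd h4 (by omega)
    · rw [if_neg h4]
      by_cases h5 : t[n + 1]? = some ' '
      · rw [if_pos h5]; simp
      · rw [if_neg h5]
        rcases Nat.lt_or_ge j (n + 1) with hj | hj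
        · exact ih ⟨j, h1, by omega, h3⟩
        · have hj2 : j = n + 1 := by omega
          subst hj2
          exact absurd h3 h5

lemma winLS_max (t : List Char) (lo : Nat) : ∀ hi l, winLS t lo hi = some l →
    ∀ j, l < j → j ≤ hi → t[j]? ≠ some ' ' := by
  intro hi
  induction hi with
  | zero =>
    intro l h j h1 h2
    rcases winLS_some t lo 0 l h with ⟨-, hl, -⟩
    omega
  | succ n ih =>
    intro l h j h1 h2
    simp only [winLS] at h
    by_cases h4 : n + 1 < lo
    · rw [if_pos h4] at h; exact absurd h (by simp)
    · rw [if_neg h4] at h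
      by_cases h5 : t[n + 1]? = some ' '
      · rw [if_pos h5] at h
        obtain rfl : n + 1 = l := Option.some.inj h
        omega
      · rw [if_neg h5] at h
        rcases Nat.lt_or_ge j (n + 1) with hj | hj
        · exact ih l h j h1 (by omega)
        · have hj2 : j = n + 1 := by omega
          subst hj2
          exact h5

-- the three facts above pin winLS down uniquely
lemma winLS_eq_of (t : List Char) (hi l : Nat) (hsp : t[l]? = some ' ') (hle : l ≤ hi)
    (hmax : ∀ j, l < j → j ≤ hi → t[j]? ≠ some ' ') : winLS t 0 hi = some l := by
  cases hw : winLS t 0 hi with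
  | none => exact absurd hw (winLS_isSome t 0 hi ⟨l, by omega, hle, hsp⟩)
  | some l' =>
    rcases winLS_some t 0 hi l' hw with ⟨-, h1, h2⟩
    rcases Nat.lt_trichotomy l l' with h | h | h
    · exact absurd h2 (hmax l' h h1)
    · rw [h]
    · exact absurd hsp (winLS_max t 0 hi l' hw l h hle)

lemma winLS_split (t : List Char) (lo : Nat) : ∀ hi, lo ≤ hi →
    winLS t lo hi = (winLS t (lo + 1) hi).orElse
      (fun _ => if t[lo]? = some ' ' then some lo else none) := by
  intro hi
  induction hi with
  | zero =>
    intro h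
    have hlo : lo = 0 := by omega
    subst hlo
    rw [winLS_none_of_lt t 1 0 (by omega)]
    by_cases hsp : t[0]? = some ' ' <;> simp [winLS, hsp, Option.orElse]
  | succ n ih =>
    intro h
    rcases Nat.lt_or_ge n lo with hn | hn
    · have hlo : lo = n + 1 := by omega
      subst hlo
      rw [winLS_none_of_lt t (n + 1 + 1) (n + 1) (by omega)]
      simp only [winLS]
      rw [if_neg (show ¬ (n + 1 < n + 1) by omega), winLS_none_of_lt t (n + 1) n (by omega)]
      by_cases hsp : t[n + 1]? = some ' ' <;> simp [hsp, Option.orElse]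
    · simp only [winLS]
      rw [if_neg (show ¬ (n + 1 < lo) by omega), if_neg (show ¬ (n + 1 < lo + 1) by omega)]
      by_cases hsp : t[n + 1]? = some ' '
      · simp [hsp, Option.orElse]
      · rw [if_neg hsp, if_neg hsp, ih hn]

-- ===== A side: the inner for-loop computes winLS =====

lemma pvA_inner_none (columns : Int) : ∀ (cs : List Char) (pos : Nat) (ls : Option Nat),
    (∀ p, pos ≤ p → p < pos + cs.length → (p : Int) ≠ columns) →
    pvA_inner columns cs pos ls = none := by
  intro cs
  induction cs with
  | nil => intro pos ls _; rfl
  | cons c rest ih =>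
    intro pos ls h
    have hp : (pos : Int) ≠ columns :=
      h pos (le_refl _) (by simp only [List.length_cons]; omega)
    simp only [pvA_inner]
    rw [if_neg (by tauto)]
    exact ih (pos + 1) _ (fun p h1 h2 => h p (by omega) (by simp only [List.length_cons]; omega))

lemma pvA_inner_eq (k : Nat) (t : List Char) (hk : k < t.length) :
    ∀ (d pos : Nat) (ls : Option Nat), pos ≤ k → k - pos = d →
    pvA_inner (k : Int) (t.drop pos) pos ls = (winLS t pos k).orElse (fun _ => ls) := by
  intro d
  induction d with
  | zero =>
    intro pos ls hpos hd
    have hpk : pos = k := by omega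
    subst hpk
    rw [List.drop_eq_getElem_cons hk]
    rw [winLS_self t pos, List.getElem?_eq_getElem hk]
    by_cases hsp : t[pos] = ' '
    · have hstep : pvA_inner (pos : Int) (t[pos] :: t.drop (pos + 1)) pos ls = some pos := by
        simp [pvA_inner, hsp]
      rw [hstep, if_pos (by rw [hsp])]
      simp [Option.orElse]
    · cases ls with
      | some v =>
        have hstep : pvA_inner (pos : Int) (t[pos] :: t.drop (pos + 1)) pos (some v) = some v := by
          simp [pvA_inner, hsp]
        rw [hstep, if_neg (by simpa using hsp)]
        simp [Option.orElse]
      | none =>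
        have htail : pvA_inner (pos : Int) (t.drop (pos + 1)) (pos + 1) none = none :=
          pvA_inner_none (pos : Int) (t.drop (pos + 1)) (pos + 1) none
            (fun p h1 h2 hpk => by
              have hne : p = pos := by exact_mod_cast hpk
              omega)
        have hstep : pvA_inner (pos : Int) (t[pos] :: t.drop (pos + 1)) pos none = none := by
          simp [pvA_inner, hsp, htail]
        rw [hstep, if_neg (by simpa using hsp)]
        simp [Option.orElse]
  | succ n ih =>
    intro pos ls hpos hd
    have hposlt : pos < k := by omega
    have hplen : pos < t.length := by omega
    rw [List.drop_eq_getElem_cons hplen]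
    simp only [pvA_inner]
    rw [if_neg (by
      rintro ⟨h', -⟩
      have hne : pos = k := by exact_mod_cast h'
      omega)]
    rw [ih (pos + 1) _ (by omega) (by omega)]
    rw [winLS_split t pos k (by omega), List.getElem?_eq_getElem hplen]
    by_cases hsp : t[pos] = ' ' <;>
      cases winLS t (pos + 1) k <;>
        simp [hsp, Option.orElse]

-- ===== unfolding lemmas for A's while-loop =====

lemma pvA_loop_nil (columns : Int) (d : Nat) (lines : List (List Char)) :
    pvA_loop columns d [] lines = lines := by
  cases d <;> rfl

lemma pvA_loop_cons_some (columns : Int) (d : Nat) (c : Char) (cs : List Char)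
    (lines : List (List Char)) (i : Nat) (h : pvA_inner columns (c :: cs) 0 none = some i) :
    pvA_loop columns (d + 1) (c :: cs) lines =
      pvA_loop columns d ((c :: cs).drop (i + 1)) (lines ++ [(c :: cs).take i]) := by
  simp only [pvA_loop, h]

lemma pvA_loop_break (columns : Int) (d : Nat) (t : List Char) (hne : t ≠ [])
    (lines : List (List Char)) (i : Nat) (h : pvA_inner columns t 0 none = some i) :
    pvA_loop columns (d + 1) t lines =
      pvA_loop columns d (t.drop (i + 1)) (lines ++ [t.take i]) := by
  cases t with
  | nil => exact absurd rfl hne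
  | cons c cs => exact pvA_loop_cons_some columns d c cs lines i h

lemma pvA_loop_cons_none (columns : Int) (d : Nat) (c : Char) (cs : List Char)
    (lines : List (List Char)) (h : pvA_inner columns (c :: cs) 0 none = none)
    (hfit : ¬ (((c :: cs).length : Int) > columns)) :
    pvA_loop columns (d + 1) (c :: cs) lines =
      pvA_loop columns d ((c :: cs).drop ((((c :: cs).length - 1) + 1) + 1))
        (lines ++ [(c :: cs).take (((c :: cs).length - 1) + 1)]) := by
  simp only [pvA_loop, h]
  rw [if_neg hfit]

-- whole remainder fits: A emits it as the last line
lemma pvA_loop_fits (m : Nat) (d : Nat) (t : List Char) (hne : t ≠ []) (hfit : t.length ≤ m)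
    (lines : List (List Char)) : pvA_loop (m : Int) (d + 1) t lines = lines ++ [t] := by
  cases t with
  | nil => exact absurd rfl hne
  | cons c cs =>
    have hinn : pvA_inner (m : Int) (c :: cs) 0 none = none := by
      apply pvA_inner_none
      intro p h1 h2 hpk
      have hp : p = m := by exact_mod_cast hpk
      simp only [List.length_cons] at h2 hfit
      omega
    rw [pvA_loop_cons_none _ _ _ _ _ hinn (by omega)]
    have hpos : (c :: cs).length - 1 + 1 = (c :: cs).length := by
      simp only [List.length_cons]; omega
    rw [hpos, List.take_length, List.drop_eq_nil_of_le (by omega), pvA_loop_nil]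

-- ===== split(' ') : splitOn equals the structural splitter sp =====

def sp : List Char → List (List Char)
  | [] => [[]]
  | c :: rest =>
    let r := sp rest
    if c = ' ' then [] :: r else (c :: r.headI) :: r.tail

lemma sp_ne_nil (t : List Char) : sp t ≠ [] := by
  cases t with
  | nil => simp [sp]
  | cons c rest =>
    simp only [sp]
    by_cases h : c = ' ' <;> simp [h]

-- prepend pre to the first piece
def spPre (pre : List Char) : List (List Char) → List (List Char)
  | [] => [pre]
  | w :: ws => (pre ++ w) :: ws

lemma spPre_sp (pre : List Char) (t : List Char) :
    spPre pre (sp t) = (pre ++ (sp t).headI) :: (sp t).tail := by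
  cases ht : sp t with
  | nil => exact absurd ht (sp_ne_nil t)
  | cons w ws => simp [spPre]

lemma splitOn_go_eq : ∀ (fuel : Nat) (l cur : List Char)
    (acc : List (List Char)), l.length < fuel →
    PySem.Chars.splitOn.go [' '] fuel l cur acc = acc.reverse ++ spPre cur.reverse (sp l) := by
  intro fuel
  induction fuel with
  | zero => intro l cur acc h; omega
  | succ n ih =>
    intro l cur acc h
    cases l with
    | nil =>
      simp only [PySem.Chars.splitOn.go, sp, spPre, List.reverse_cons]
      simp
    | cons c rest =>
      by_cases hc : c = ' '
      · subst hc
        have hpre : [' '].isPrefixOf (' ' :: rest) = true := by simp [List.isPrefixOf]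
        have hstep : PySem.Chars.splitOn.go [' '] (n + 1) (' ' :: rest) cur acc =
            PySem.Chars.splitOn.go [' '] n (List.drop [' '].length (' ' :: rest)) []
              (cur.reverse :: acc) := by
          simp only [PySem.Chars.splitOn.go, hpre]
          simp
        rw [hstep]
        simp only [List.length_singleton, List.drop_succ_cons, List.drop_zero]
        rw [ih rest [] (cur.reverse :: acc) (by simp at h ⊢; omega)]
        have hp0 : spPre [] (sp rest) = sp rest := by
          cases hr : sp rest with
          | nil => exact absurd hr (sp_ne_nil rest)
          | cons w ws => simp [spPre]
        have hsp : sp (' ' :: rest) = [] :: sp rest := by simp [sp]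
        rw [hsp]
        simp only [List.reverse_nil, hp0, List.reverse_cons]
        cases hr : sp rest with
        | nil => exact absurd hr (sp_ne_nil rest)
        | cons v vs => simp [spPre]
      · have hpre : [' '].isPrefixOf (c :: rest) = false := by
          simp [List.isPrefixOf]
          exact fun hcon => absurd hcon.symm hc
        have hstep : PySem.Chars.splitOn.go [' '] (n + 1) (c :: rest) cur acc =
            PySem.Chars.splitOn.go [' '] n rest (c :: cur) acc := by
          simp only [PySem.Chars.splitOn.go, hpre]
          simp
        rw [hstep, ih rest (c :: cur) acc (by simp at h ⊢; omega)]
        rw [spPre_sp, spPre_sp]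
        simp only [sp, List.reverse_cons]
        rw [if_neg hc]
        simp

lemma splitOn_eq_sp (t : List Char) : PySem.Chars.splitOn t [' '] = sp t := by
  show PySem.Chars.splitOn.go [' '] (t.length + 1) t [] [] = sp t
  rw [splitOn_go_eq (t.length + 1) t [] [] (by omega)]
  rw [spPre_sp]
  simp
  cases ht : sp t with
  | nil => exact absurd ht (sp_ne_nil t)
  | cons w ws => simp

-- join with a single space: abbreviation J
def J (words : List (List Char)) : List Char := PySem.Chars.join [' '] words

lemma J_singleton (w : List Char) : J [w] = w := by simp [J, PySem.Chars.join, List.intercalate]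
lemma J_cons_cons (w y : List Char) (ws : List (List Char)) :
    J (w :: y :: ws) = w ++ ' ' :: J (y :: ws) := by
  simp [J, PySem.Chars.join, List.intercalate, List.intersperse]

lemma J_cons (w : List Char) (ws : List (List Char)) (h : ws ≠ []) :
    J (w :: ws) = w ++ ' ' :: J ws := by
  cases ws with
  | nil => exact absurd rfl h
  | cons y zs => exact J_cons_cons w y zs

lemma sp_join (t : List Char) : J (sp t) = t := by
  induction t with
  | nil => simp [sp, J_singleton]
  | cons c rest ih =>
    simp only [sp]
    by_cases hc : c = ' '
    · subst hc
      rw [if_pos rfl, J_cons [] (sp rest) (sp_ne_nil rest), ih]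
      simp
    · rw [if_neg hc]
      cases hr : sp rest with
      | nil => exact absurd hr (sp_ne_nil rest)
      | cons w ws =>
        rw [hr] at ih
        cases ws with
        | nil =>
          simp only [List.headI, List.tail_cons, J_singleton] at ih ⊢
          rw [ih]
        | cons y zs =>
          simp only [List.headI, List.tail_cons] at ih ⊢
          rw [J_cons_cons] at ih ⊢
          rw [List.cons_append]
          exact congrArg (List.cons c) ih

lemma sp_no_space (t : List Char) : ∀ w ∈ sp t, ' ' ∉ w := by
  induction t with
  | nil => simp [sp]
  | cons c rest ih =>
    simp only [sp]
    by_cases hc : c = ' '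
    · rw [if_pos hc]
      intro w hw
      rcases List.mem_cons.1 hw with h | h
      · subst h; simp
      · exact ih w h
    · rw [if_neg hc]
      intro w hw
      rcases List.mem_cons.1 hw with h | h
      · subst h
        intro hmem
        rcases List.mem_cons.1 hmem with h2 | h2
        · exact hc h2.symm
        · cases hr : sp rest with
          | nil => exact absurd hr (sp_ne_nil rest)
          | cons v vs =>
            rw [hr] at h2
            exact ih v (by simp [hr]) h2
      · cases hr : sp rest with
        | nil => exact absurd hr (sp_ne_nil rest)
        | cons v vs =>
          rw [hr] at h
          simp only [List.tail_cons] at h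
          exact ih w (by simp [hr, h])

-- split produces at most one word per character plus one
lemma sp_length_le (t : List Char) : (sp t).length ≤ t.length + 1 := by
  induction t with
  | nil => simp [sp]
  | cons c rest ih =>
    simp only [sp]
    by_cases hc : c = ' '
    · rw [if_pos hc]
      simp only [List.length_cons]
      omega
    · rw [if_neg hc]
      simp only [List.length_cons]
      cases hr : sp rest with
      | nil => exact absurd hr (sp_ne_nil rest)
      | cons v vs =>
        rw [hr] at ih
        simp only [List.length_cons] at ih ⊢
        simp only [List.tail_cons]
        omega

-- join [] with nonempty tail means the whole words list is [[]]
lemma join_eq_nil (words : List (List Char)) (hne : words ≠ []) (h : J words = []) :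
    words = [[]] := by
  cases words with
  | nil => exact absurd rfl hne
  | cons w ws =>
    cases ws with
    | nil =>
      rw [J_singleton] at h
      rw [h]
    | cons y zs =>
      rw [J_cons_cons] at h
      rcases List.append_eq_nil_iff.1 h with ⟨-, h2⟩
      exact absurd h2 (by simp)

-- decomposition of the joined text at word boundary k
lemma J_take_drop (k : Nat) : ∀ (words : List (List Char)), 1 ≤ k → k < words.length →
    J words = J (words.take k) ++ ' ' :: J (words.drop k) := by
  induction k with
  | zero => intro words h; omega
  | succ n ih =>
    intro words h1 h2
    cases words with
    | nil => simp at h2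
    | cons w ws =>
      cases Nat.eq_zero_or_pos n with
      | inl hn =>
        subst hn
        have hws : ws ≠ [] := by
          intro hcon; subst hcon; simp at h2
        simp only [List.take_succ_cons, List.take_zero, List.drop_succ_cons, List.drop_zero]
        rw [J_singleton, J_cons w ws hws]
      | inr hn =>
        simp only [List.take_succ_cons, List.drop_succ_cons]
        have hlen : n < ws.length := by simp only [List.length_cons] at h2; omega
        have htne : ws.take n ≠ [] := by
          intro hcon
          have h0 : min n ws.length = 0 := by
            simpa [List.length_take] using congrArg List.length hcon
          omega
        have hwsne : ws ≠ [] := by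
          intro hcon; subst hcon; simp at hlen
        rw [J_cons w ws hwsne, ih ws hn hlen, J_cons w (ws.take n) htne]
        simp

lemma J_take_one (w : List Char) (ws : List (List Char)) : J ((w :: ws).take 1) = w := by
  simp [J_singleton]

-- length bookkeeping: J (take (k+1)) = J (take k) ++ ' ' :: words[k]
lemma J_take_succ (words : List (List Char)) (k : Nat) (h1 : 1 ≤ k) (h2 : k < words.length) :
    J (words.take (k + 1)) = J (words.take k) ++ ' ' :: words.getD k [] := by
  have hlen : k < (words.take (k + 1)).length := by
    rw [List.length_take]; omega
  have hstep := J_take_drop k (words.take (k + 1)) h1 hlen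
  have ht1 : (words.take (k + 1)).take k = words.take k := by
    rw [List.take_take]
    congr 1
    omega
  have ht2 : (words.take (k + 1)).drop k = [words.getD k []] := by
    rw [List.drop_take]
    have hk1 : k + 1 - k = 1 := by omega
    rw [hk1, List.drop_eq_getElem_cons h2]
    simp only [List.take_succ_cons, List.take_zero]
    simp [List.getD, List.getElem?_eq_getElem h2]
  rw [hstep, ht1, ht2, J_singleton]

-- J-length is monotone in the number of words taken
lemma J_len_mono (words : List (List Char)) : ∀ (j j' : Nat), 1 ≤ j → j ≤ j' →
    j' ≤ words.length → (J (words.take j)).length ≤ (J (words.take j')).length := by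
  intro j j' h1 h2 h3
  induction j' with
  | zero => omega
  | succ n ih =>
    rcases Nat.lt_or_ge j (n + 1) with h | h
    · have := ih (by omega) (by omega)
      have hstep : (J (words.take n)).length ≤ (J (words.take (n + 1))).length := by
        rw [J_take_succ words n (by omega) (by omega)]
        simp
      omega
    · have hj : j = n + 1 := by omega
      subst hj
      omega

-- ===== the greedy while-loop: stop-point characterisation =====

lemma pvGreedy_spec (c : Int) (words : List (List Char)) :
    ∀ (d k : Nat), 1 ≤ k → k ≤ words.length → words.length - k ≤ d →
    ∃ k', pvGreedy c words d (J (words.take k)) k = (J (words.take k'), k') ∧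
      k ≤ k' ∧ k' ≤ words.length ∧
      (k' = words.length ∨ ¬ (((J (words.take (k' + 1))).length : Int) ≤ c)) ∧
      (k' = k ∨ ((J (words.take k')).length : Int) ≤ c) := by
  intro d
  induction d with
  | zero =>
    intro k h1 h2 hd
    have hk : k = words.length := by omega
    exact ⟨k, rfl, le_refl _, h2, Or.inl hk, Or.inl rfl⟩
  | succ n ih =>
    intro k h1 h2 hd
    by_cases hcond : k < words.length ∧
        (((J (words.take k)).length : Int) + 1 + ((words.getD k []).length : Int) ≤ c)
    · have hJsucc := J_take_succ words k h1 hcond.1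
      have hJlen : ((J (words.take (k + 1))).length : Int) =
          ((J (words.take k)).length : Int) + 1 + ((words.getD k []).length : Int) := by
        rw [hJsucc]
        simp only [List.length_append, List.length_cons]
        push_cast
        ring
      rcases ih (k + 1) (by omega) (by omega) (by omega) with ⟨k', hrec, hk1, hk2, hk3, hk4⟩
      refine ⟨k', ?_, by omega, hk2, hk3, ?_⟩
      · simp only [pvGreedy]
        rw [if_pos hcond, ← hJsucc, hrec]
      · right
        rcases hk4 with h | h
        · rw [h]; omega
        · exact h
    · refine ⟨k, ?_, le_refl _, h2, ?_, Or.inl rfl⟩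
      · simp only [pvGreedy]
        rw [if_neg hcond]
      · rcases Nat.lt_or_ge k words.length with h | h
        · right
          intro hle
          apply hcond
          refine ⟨h, ?_⟩
          have hJlen : ((J (words.take (k + 1))).length : Int) =
              ((J (words.take k)).length : Int) + 1 + ((words.getD k []).length : Int) := by
            rw [J_take_succ words k h1 h]
            simp only [List.length_append, List.length_cons]
            push_cast
            ring
          omega
        · left; omega

-- one unfolding step of pvPack on a non-terminal word list
lemma pvPack_cons (c : Int) (d : Nat) (w : List Char) (ws : List (List Char))
    (h : ¬ (w :: ws = [[]])) :
    pvPack c (d + 1) (w :: ws) =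
      (if ((pvGreedy c (w :: ws) (w :: ws).length w 1).1.length : Int) > c then []
       else if (pvGreedy c (w :: ws) (w :: ws).length w 1).2 = (w :: ws).length then
         [(pvGreedy c (w :: ws) (w :: ws).length w 1).1]
       else (pvGreedy c (w :: ws) (w :: ws).length w 1).1 ::
         pvPack c d ((w :: ws).drop (pvGreedy c (w :: ws) (w :: ws).length w 1).2)) := by
  simp only [pvPack]
  rw [if_neg h]

-- invariant: every window of m+1 consecutive characters contains a space
def pvInv (cs : List Char) (m : Nat) : Prop :=
  ∀ i, i + m < cs.length → ∃ j, i ≤ j ∧ j ≤ i + m ∧ cs[j]? = some ' '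

lemma pvInv_drop (cs : List Char) (m q : Nat) (h : pvInv cs m) : pvInv (cs.drop q) m := by
  intro i hi
  rw [List.length_drop] at hi
  rcases h (q + i) (by omega) with ⟨j, h1, h2, h3⟩
  refine ⟨j - q, by omega, by omega, ?_⟩
  rw [List.getElem?_drop]
  have hj : q + (j - q) = j := by omega
  rw [hj]; exact h3

-- ===== the main loop correspondence =====

lemma main_loop (m : Nat) : ∀ (fuel : Nat) (words : List (List Char)),
    words.length ≤ fuel → words ≠ [] → (∀ w ∈ words, ' ' ∉ w) →
    pvInv (J words) m → ∀ (da db : Nat), words.length ≤ da → words.length ≤ db → ∀ lines,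
    pvA_loop (m : Int) da (J words) lines = lines ++ pvPack (m : Int) db words := by
  intro fuel
  induction fuel with
  | zero =>
    intro words h1 h2
    interval_cases h : words.length
    · exact absurd (List.eq_nil_of_length_eq_zero h) h2
  | succ n ih =>
    intro words hfuel hne hnospace hinv da db hda hdb lines
    by_cases hnil : words = [[]]
    · subst hnil
      cases db with
      | zero => simp at hdb
      | succ db' =>
        rw [show J [[]] = [] from rfl, pvA_loop_nil]
        simp [pvPack]
    cases hw : words with
    | nil => exact absurd hw hne
    | cons w ws =>
    rw [← hw]
    have htne : J words ≠ [] := fun hcon => hnil (join_eq_nil words hne hcon)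
    set t := J words with ht
    have hn1 : 1 ≤ words.length := by rw [hw]; simp
    obtain ⟨da', rfl⟩ : ∃ da', da = da' + 1 := ⟨da - 1, by omega⟩
    obtain ⟨db', rfl⟩ : ∃ db', db = db' + 1 := ⟨db - 1, by omega⟩
    by_cases hfit : t.length ≤ m
    · -- whole text fits: both emit it as a single last line
      rw [pvA_loop_fits m da' t htne hfit lines]
      -- greedy consumes all words
      rcases pvGreedy_spec ((m : Nat) : Int) words words.length 1 (le_refl _) hn1 (by omega)
        with ⟨k', hg, hk1, hk2, hk3, -⟩
      have hkn : k' = words.length := by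
        by_contra hne'
        have hlt : k' < words.length := by omega
        rcases hk3 with h | h
        · exact hne' h
        · apply h
          have hmono := J_len_mono words (k' + 1) words.length (by omega) (by omega) (le_refl _)
          rw [List.take_length, ← ht] at hmono
          have hcast : ((J (words.take (k' + 1))).length : Int) ≤ (t.length : Int) := by
            exact_mod_cast hmono
          have hfm : ((t.length : Nat) : Int) ≤ ((m : Nat) : Int) := by exact_mod_cast hfit
          omega
      have hw1 : w = J (words.take 1) := by rw [hw, J_take_one]
      have hg' : pvGreedy ((m : Nat) : Int) (w :: ws) (w :: ws).length w 1 =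
          (J (words.take k'), k') := by
        rw [← hw, hw1]; exact hg
      rw [hw, pvPack_cons _ db' _ _ (hw ▸ hnil), hg']
      have htJ : J (words.take k') = t := by rw [hkn, List.take_length, ← ht]
      rw [htJ]
      rw [if_neg (by push_cast; omega), if_pos (by rw [← hw, hkn])]
    · -- the remainder is longer than columns: both break at the last fitting space
      rw [Nat.not_le] at hfit
      rcases pvGreedy_spec ((m : Nat) : Int) words words.length 1 (le_refl _) hn1 (by omega)
        with ⟨k', hg, hk1, hk2, hk3, hk4⟩
      -- a space exists in the first m+1 characters
      rcases hinv 0 (by omega) with ⟨s, -, hs2, hs3⟩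
      have hsp_ge : ∀ p, t[p]? = some ' ' → (J (words.take 1)).length ≤ p := by
        intro p hp
        by_contra hcon
        rw [Nat.not_le] at hcon
        rw [hw, J_take_one] at hcon
        -- p < w.length: t[p] is inside the space-free first word
        have hdec : ∃ r, t = w ++ r := by
          cases ws with
          | nil => exact ⟨[], by rw [ht, hw, J_singleton]; simp⟩
          | cons y zs => exact ⟨' ' :: J (y :: zs), by rw [ht, hw, J_cons_cons]⟩
        rcases hdec with ⟨r, hr⟩
        rw [hr, List.getElem?_append_left hcon] at hp
        exact hnospace w (by rw [hw]; simp) (List.mem_of_getElem? hp)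
      have hkn : k' < words.length := by
        rcases Nat.lt_or_ge k' words.length with h | h
        · exact h
        · exfalso
          have hk'' : k' = words.length := by omega
          rcases hk4 with h4 | h4
          · -- k' = 1 = words.length : a single space-free word longer than m
            have hlen1 : words.length = 1 := by omega
            have hws : words = [w] := by
              rw [hw] at hlen1 ⊢
              simp only [List.length_cons] at hlen1
              rw [List.eq_nil_of_length_eq_zero (show ws.length = 0 by omega)]
            rw [ht, hws, J_singleton] at hs3
            exact hnospace w (by rw [hws]; simp) (List.mem_of_getElem? hs3)
          · rw [hk'', List.take_length, ← ht] at h4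
            omega
      have hk'1 : 1 ≤ k' := by omega
      -- the break position
      set l := (J (words.take k')).length with hl
      have hdecomp : t = J (words.take k') ++ ' ' :: J (words.drop k') :=
        ht ▸ J_take_drop k' words hk'1 hkn
      have hlsp : t[l]? = some ' ' := by
        rw [hdecomp, hl, List.getElem?_append_right (le_refl _)]
        simp
      have hlm : l ≤ m := by
        rcases hk4 with h4 | h4
        · -- k' = 1: the first space bound gives |w0| ≤ s ≤ m
          have := hsp_ge s hs3
          rw [h4] at hl
          omega
        · have : ((J (words.take k')).length : Int) ≤ (m : Int) := h4
          omega
      have hmax : ∀ j, l < j → j ≤ m → t[j]? ≠ some ' ' := by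
        intro j hj1 hj2 hjsp
        -- j lands inside the space-free word words[k']
        have hJs : J (words.take (k' + 1)) = J (words.take k') ++ ' ' :: words.getD k' [] := by
          exact J_take_succ words k' hk'1 hkn
        have hJslen : (J (words.take (k' + 1))).length = l + 1 + (words.getD k' []).length := by
          rw [J_take_succ words k' hk'1 hkn]
          simp only [List.length_append, List.length_cons, ← hl]
          omega
        have hbound : ((J (words.take (k' + 1))).length : Int) > (m : Int) := by
          rcases hk3 with h | h
          · omega
          · omega
        have hjw : j - l - 1 < (words.getD k' []).length := by
          have : (J (words.take (k' + 1))).length > m := by exact_mod_cast hbound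
          omega
        have hdrop : words.drop k' = words.getD k' [] :: words.drop (k' + 1) := by
          rw [List.drop_eq_getElem_cons hkn]
          simp [List.getD, List.getElem?_eq_getElem hkn]
        have hpref : ∃ r, J (words.drop k') = words.getD k' [] ++ r := by
          rw [hdrop]
          cases hq : words.drop (k' + 1) with
          | nil => exact ⟨[], by rw [J_singleton]; simp⟩
          | cons y zs => exact ⟨' ' :: J (y :: zs), by rw [J_cons_cons]⟩
        rcases hpref with ⟨r, hr⟩
        rw [hdecomp, List.getElem?_append_right (by omega)] at hjsp
        have hj1' : j - l = (j - l - 1) + 1 := by omega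
        rw [hj1'] at hjsp
        simp only [List.getElem?_cons_succ] at hjsp
        rw [hr, List.getElem?_append_left hjw] at hjsp
        exact hnospace (words.getD k' []) (by
          have : words.getD k' [] ∈ words := by
            have hg2 := List.getElem_mem (l := words) (n := k') hkn
            simpa [List.getD, List.getElem?_eq_getElem hkn] using hg2
          exact this) (List.mem_of_getElem? hjsp)
      have hwls : winLS t 0 m = some l := winLS_eq_of t m l hlsp hlm hmax
      -- A's step
      have hmlen : m < t.length := hfit
      have hinn : pvA_inner ((m : Nat) : Int) t 0 none = some l := by
        have h0 := pvA_inner_eq m t hmlen m 0 none (by omega) (by omega)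
        simp only [List.drop_zero] at h0
        rw [h0, hwls]
        rfl
      rw [pvA_loop_break _ da' t htne lines l hinn]
      have htake : t.take l = J (words.take k') := by
        rw [hdecomp, hl]
        exact List.take_left
      have hdrop2 : t.drop (l + 1) = J (words.drop k') := by
        rw [hdecomp]
        have h1 : (J (words.take k') ++ ' ' :: J (words.drop k')).drop l =
            ' ' :: J (words.drop k') := by
          rw [hl]
          exact List.drop_left
        rw [← List.drop_drop, h1]
        simp
      -- B's step
      have hpack : pvPack ((m : Nat) : Int) (db' + 1) words =
          J (words.take k') :: pvPack ((m : Nat) : Int) db' (words.drop k') := by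
        have hw1 : w = J (words.take 1) := by rw [hw, J_take_one]
        have hg' : pvGreedy ((m : Nat) : Int) (w :: ws) (w :: ws).length w 1 =
            (J (words.take k'), k') := by
          rw [← hw, hw1]; exact hg
        rw [hw, pvPack_cons _ db' _ _ (hw ▸ hnil), hg']
        rw [if_neg (by
          rw [show (J (words.take k')).length = l from hl.symm]
          omega)]
        rw [if_neg (by rw [← hw]; omega), ← hw]
      rw [hpack]
      -- recurse
      have hrest := ih (words.drop k') (by rw [List.length_drop]; omega)
        (by
          intro hcon
          have := congrArg List.length hcon
          rw [List.length_drop] at this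
          simp at this
          omega)
        (fun v hv => hnospace v (List.mem_of_mem_drop hv))
        (by rw [← hdrop2]; exact pvInv_drop t m (l + 1) (ht ▸ hinv))
        da' db' (by rw [List.length_drop]; omega) (by rw [List.length_drop]; omega)
        (lines ++ [J (words.take k')])
      rw [htake, hdrop2, hrest]
      simp

-- ===== VERDICT (by name: the statement is the Claim_ definition above) =====
theorem linebreak3_spec : Claim_equal_linebreak3 := by
  intro text columns _ hpre
  unfold Spec_linebreak3
  unfold linebreak3 linebreak3_alt
  rcases hpre with hempty | ⟨hc, hwin⟩
  · subst hempty
    have h : String.toList "" = [] := rfl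
    rw [h, pvA_loop_nil, splitOn_eq_sp]
    rw [show sp [] = [[]] from rfl]
    simp [pvPack]
  · have hk : columns = ((columns.toNat : Nat) : Int) := by omega
    rw [splitOn_eq_sp]
    have hinv : pvInv (J (sp text.toList)) columns.toNat := by
      rw [sp_join]
      intro i hi
      rcases hwin i (by omega) hi with ⟨j, h1, h2, h3⟩
      exact ⟨j, h2, h1, h3⟩
    have := main_loop columns.toNat (sp text.toList).length (sp text.toList) (le_refl _)
      (sp_ne_nil text.toList) (sp_no_space text.toList) hinv
      (text.toList.length + 1) (sp text.toList).length
      (by have := sp_length_le text.toList; omega) (le_refl _) []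
    rw [sp_join] at this
    rw [hk, this]
    simp
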